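-- pv_equiv track=rewrite | github.com/cofla159/algorithm_problems | 프로그래머스/1/64061. 크레인 인형뽑기 게임/크레인 인형뽑기 게임.py | solution
-- ===== SOURCE A (Python) =====
-- def solution(board, moves):
--     basket = []
--     n = len(board)
--     new_board = []
--     picked = 0
--
--     for i in range(n):
--         temp = []
--         for j in range(n):
--             if board[j][i] != 0:
--                 temp.append(board[j][i])
--         new_board.append(temp)
--
--     for move in moves:
--         if len(new_board[move-1]):
--             picked += 1
--             got = new_board[move-1].pop(0)
--             if len(basket) and basket[-1] == got:
--                 basket.pop()
--             else:
--                 basket.append(got)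
--
--     return picked-len(basket)
-- ===== SOURCE B (Python) =====
-- def solution(board, moves):
--     # No column preprocessing: scan the board rows top-to-bottom per move on a copied grid.
--     grid = [list(row) for row in board]
--     basket = []
--     picked = 0
--     for move in moves:
--         for row in grid:
--             v = row[move - 1]
--             if v != 0:
--                 row[move - 1] = 0
--                 picked += 1
--                 if basket and basket[-1] == v:
--                     basket.pop()
--                 else:
--                     basket.append(v)
--                 break
--     return picked - len(basket)
-- ===== Notes on version B (the rewrite author's own statement) =====
-- stated objective: simpler
-- what changed: B drops A's column-table preprocessing and per-pop list rebuilding entirely: for each move it scans the grid's rows top-to-bottom and zeroes the first non-zero cell of the requested column, keeping the same basket stack.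
-- outside the precondition, e.g. on solution([[1, 2, 2], [4, 2, 6]], [0, 0]): A returns 2, B returns 0
import Mathlib
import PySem

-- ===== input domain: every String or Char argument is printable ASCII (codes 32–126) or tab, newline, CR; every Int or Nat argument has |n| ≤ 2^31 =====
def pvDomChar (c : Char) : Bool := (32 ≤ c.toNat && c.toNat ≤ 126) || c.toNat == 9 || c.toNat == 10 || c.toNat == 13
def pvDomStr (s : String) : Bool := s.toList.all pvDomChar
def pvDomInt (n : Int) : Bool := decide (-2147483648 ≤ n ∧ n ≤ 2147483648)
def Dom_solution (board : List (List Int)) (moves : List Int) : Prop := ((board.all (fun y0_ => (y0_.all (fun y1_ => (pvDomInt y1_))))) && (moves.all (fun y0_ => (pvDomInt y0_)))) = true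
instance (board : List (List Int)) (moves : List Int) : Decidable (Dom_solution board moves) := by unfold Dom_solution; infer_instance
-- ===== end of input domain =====

-- B drops A's column-table preprocessing and instead, per move, scans the copied grid's rows
-- top-to-bottom for the first non-zero doll in the requested column (A mutates nothing in Lean;
-- in Python, A leaves `board` intact and B copies the rows, so neither mutates the argument).

-- ===== PORT A =====
-- the `for move in moves` loop body of A (state: new_board, basket, picked)
def stepA (st : List (List Int) × List Int × Int) (move : Int) : List (List Int) × List Int × Int :=
  match PySem.List.pyGet? st.1 (move - 1) with
  | none => st                          -- IndexError in Python; unreachable under Pre_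
  | some col =>
    if col.length ≠ 0 then
      match PySem.List.pop? col 0 with
      | none => st                      -- unreachable: col is non-empty
      | some (got, rest) =>
        -- writing the popped column back models Python's in-place `new_board[move-1].pop(0)`
        let nb' := PySem.List.pySetD st.1 (move - 1) rest
        if st.2.1.length ≠ 0 ∧ PySem.List.pyGet? st.2.1 (-1) = some got
        then (nb', st.2.1.dropLast, st.2.2 + 1)
        else (nb', st.2.1 ++ [got], st.2.2 + 1)
    else st

def solution (board : List (List Int)) (moves : List Int) : Int :=
  let n : Int := PySem.List.len board
  let newBoard : List (List Int) :=
    (PySem.List.pyRange 0 n).foldl (fun nb i =>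
      nb ++ [(PySem.List.pyRange 0 n).foldl (fun temp j =>
        match PySem.List.pyGet? board j with
        | none => temp                  -- unreachable: j ∈ range(len(board))
        | some row =>
          match PySem.List.pyGet? row i with
          | none => temp                -- IndexError in Python; unreachable under Pre_
          | some v => if v ≠ 0 then temp ++ [v] else temp) []]) []
  let final := moves.foldl stepA (newBoard, ([], 0))
  final.2.2 - (final.2.1.length : Int)

-- ===== PORT B =====
-- scan the rows for the first non-zero entry of column c, zero it out
def scanFirst : List (List Int) → Int → List (List Int) × Option Int
  | [], _ => ([], none)
  | row :: rest, c =>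
    match PySem.List.pyGet? row c with
    | none => (row :: rest, none)       -- IndexError in Python; unreachable under Pre_
    | some v =>
      if v ≠ 0 then (PySem.List.pySetD row c 0 :: rest, some v)
      else
        let r := scanFirst rest c
        (row :: r.1, r.2)

-- the `for move in moves` loop body of B (state: grid, basket, picked)
def stepB (st : List (List Int) × List Int × Int) (move : Int) : List (List Int) × List Int × Int :=
  match (scanFirst st.1 (move - 1)).2 with
  | none => ((scanFirst st.1 (move - 1)).1, st.2.1, st.2.2)
  | some v =>
    if st.2.1.length ≠ 0 ∧ PySem.List.pyGet? st.2.1 (-1) = some v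
    then ((scanFirst st.1 (move - 1)).1, st.2.1.dropLast, st.2.2 + 1)
    else ((scanFirst st.1 (move - 1)).1, st.2.1 ++ [v], st.2.2 + 1)

def solution_alt (board : List (List Int)) (moves : List Int) : Int :=
  let final := moves.foldl stepB (board, ([], 0))
  final.2.2 - (final.2.1.length : Int)

-- ===== PRECONDITION & SPEC =====
-- Pre_ excludes boards with a row shorter than the number of rows and moves whose Python index
-- move-1 falls outside [-n, n) (both make A raise IndexError), and -- only when some move is <= 0,
-- i.e. hits Python's negative-index wraparound -- non-square boards, where A's wrapped column
-- (counted back from A's n-column table) and B's wrapped cell (counted back from each row's own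
-- length) are two different accidental readings of a move no real claw-game input uses.
def Pre_solution (board : List (List Int)) (moves : List Int) : Prop :=
  (∀ row ∈ board, board.length ≤ row.length) ∧
  (∀ m ∈ moves, 1 - (board.length : Int) ≤ m ∧ m ≤ (board.length : Int)) ∧
  ((∃ m ∈ moves, m ≤ 0) → ∀ row ∈ board, row.length = board.length)
instance (board : List (List Int)) (moves : List Int) : Decidable (Pre_solution board moves) := by
  unfold Pre_solution; infer_instance

def pvWitness_solution : List (List Int) × List Int :=
  ([[0, 0, 1], [0, 1, 2], [3, 2, 2]], [1, 3, 3, 2, 3, 2])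

def Spec_solution (board : List (List Int)) (moves : List Int) (out : Int) : Prop := out = solution_alt board moves
instance (board : List (List Int)) (moves : List Int) (out : Int) : Decidable (Spec_solution board moves out) := by unfold Spec_solution; infer_instance

-- ===== CLAIM (what is proved, stated in full; the proofs are below) =====
def Claim_equal_solution : Prop := ∀ (board : List (List Int)) (moves : List Int), Dom_solution board moves → Pre_solution board moves → Spec_solution board moves (solution board moves)

-- ===== LEMMAS AND PROOFS =====

-- the non-zero entries of column p, top to bottom (proof-side characterisation)
def colA (p : Nat) : List (List Int) → List Int
  | [] => []
  | row :: rest => if row[p]?.getD 0 ≠ 0 then row[p]?.getD 0 :: colA p rest else colA p rest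

lemma pyRange_len (board : List (List Int)) :
    PySem.List.pyRange 0 (PySem.List.len board)
      = (List.range board.length).map (fun k : Nat => (k : Int)) := by
  rw [PySem.List.len_eq, PySem.List.pyRange_one]
  simp only [zero_add, sub_zero, Int.toNat_natCast]

lemma pyGet?_getDx {a : Type} (l : List a) (p : Nat) (d : a) (h : p < l.length) :
    PySem.List.pyGet? l (p : Int) = some (l[p]?.getD d) := by
  rw [PySem.List.pyGet?_natCast, List.getElem?_eq_getElem h]
  rfl

lemma foldl_range_getElem {a b : Type} (l : List a) (d : a) (f : b → a → b) (acc : b) :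
    (List.range l.length).foldl (fun x k => f x (l[k]?.getD d)) acc = l.foldl f acc := by
  induction l generalizing acc with
  | nil => simp
  | cons x xs ih =>
    rw [List.length_cons, List.range_succ_eq_map, List.foldl_cons, List.foldl_map]
    simp only [List.getElem?_cons_zero, Option.getD_some, List.getElem?_cons_succ]
    exact ih (f acc x)

lemma inner_foldl_eq_colA (p : Nat) (rows : List (List Int)) (acc : List Int) :
    rows.foldl (fun temp row => if row[p]?.getD 0 ≠ 0 then temp ++ [row[p]?.getD 0] else temp) acc
      = acc ++ colA p rows := by
  induction rows generalizing acc with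
  | nil => simp [colA]
  | cons row rest ih =>
    by_cases h : row[p]?.getD 0 ≠ 0
    · simp only [List.foldl_cons, colA, if_pos h, ih, List.append_assoc, List.singleton_append]
    · simp only [List.foldl_cons, colA, if_neg h, ih]

lemma inner_eq_colA (board : List (List Int)) (p : Nat)
    (hsq : ∀ row ∈ board, board.length ≤ row.length) (hpn : p < board.length) :
    (List.range board.length).foldl (fun temp k =>
        match PySem.List.pyGet? board ((k : Nat) : Int) with
        | none => temp
        | some row =>
          match PySem.List.pyGet? row ((p : Nat) : Int) with
          | none => temp
          | some v => if v ≠ 0 then temp ++ [v] else temp) []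
      = colA p board := by
  rw [PySem.List.foldl_congr_mem (List.range board.length) _
    (fun temp k => if (board[k]?.getD [])[p]?.getD 0 ≠ 0
      then temp ++ [(board[k]?.getD [])[p]?.getD 0] else temp) [] ?_]
  · exact (foldl_range_getElem board [] (fun temp row =>
        if row[p]?.getD 0 ≠ 0 then temp ++ [row[p]?.getD 0] else temp) []).trans
      ((inner_foldl_eq_colA p board []).trans (List.nil_append _))
  · intro temp k hk
    have hkn : k < board.length := List.mem_range.mp hk
    have h1 := pyGet?_getDx board k [] hkn
    have hplen : p < (board[k]?.getD []).length := by
      rw [List.getElem?_eq_getElem hkn]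
      exact lt_of_lt_of_le hpn (hsq _ (List.getElem_mem _))
    have h2 := pyGet?_getDx (board[k]?.getD []) p 0 hplen
    simp only [h1, h2]

lemma build_eq_colA (board : List (List Int))
    (hsq : ∀ row ∈ board, board.length ≤ row.length) :
    (PySem.List.pyRange 0 (PySem.List.len board)).foldl (fun nb i =>
      nb ++ [(PySem.List.pyRange 0 (PySem.List.len board)).foldl (fun temp j =>
        match PySem.List.pyGet? board j with
        | none => temp
        | some row =>
          match PySem.List.pyGet? row i with
          | none => temp
          | some v => if v ≠ 0 then temp ++ [v] else temp) []]) []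
      = (List.range board.length).map (fun p => colA p board) := by
  rw [pyRange_len]
  simp only [List.foldl_map]
  rw [PySem.List.foldl_congr_mem (List.range board.length) _
    (fun nb p => nb ++ [colA p board]) [] ?_]
  · rw [PySem.List.foldl_append_singleton_eq_map]
    simp
  · intro acc p hp
    rw [inner_eq_colA board p hsq (List.mem_range.mp hp)]

lemma pyGet?_normIdx {a : Type} (l : List a) (i : Int) (p : Nat)
    (h : (0 ≤ i ∧ p = i.toNat) ∨ (i < 0 ∧ -(l.length : Int) ≤ i ∧ p = (i + l.length).toNat)) :
    PySem.List.pyGet? l i = l[p]? := by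
  rcases h with ⟨h0, hp⟩ | ⟨h0, h1, hp⟩
  · rw [PySem.List.pyGet?_of_nonneg l h0, hp]
  · have hk0 : 0 < (-i).toNat := by omega
    have hk1 : (-i).toNat ≤ l.length := by omega
    have hi : i = -(((-i).toNat : Nat) : Int) := by omega
    rw [hi, PySem.List.pyGet?_neg_natCast l _ hk0 hk1]
    congr 1
    omega

lemma pySetD_normIdx {a : Type} (l : List a) (i : Int) (v : a) (p : Nat)
    (h : (0 ≤ i ∧ p = i.toNat) ∨ (i < 0 ∧ -(l.length : Int) ≤ i ∧ p = (i + l.length).toNat)) :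
    PySem.List.pySetD l i v = l.set p v := by
  rcases h with ⟨h0, hp⟩ | ⟨h0, h1, hp⟩
  · rw [PySem.List.pySetD_of_nonneg l v h0, hp]
  · simp only [PySem.List.pySetD, PySem.List.pySet?, PySem.List.pyIdx?,
      if_neg (by omega : ¬ 0 ≤ i), if_pos h1, Option.map_some, Option.getD_some]
    congr 1
    omega

lemma scan_nil (grid : List (List Int)) (c : Int) (p : Nat)
    (hc : ∀ row ∈ grid, PySem.List.pyGet? row c = some (row[p]?.getD 0))
    (h : colA p grid = []) :
    scanFirst grid c = (grid, none) := by
  induction grid with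
  | nil => simp [scanFirst]
  | cons row rest ih =>
    have hg := hc row (by simp)
    simp only [colA] at h
    have hz : ¬ row[p]?.getD 0 ≠ 0 := by
      intro hne; rw [if_pos hne] at h; exact (List.cons_ne_nil _ _) h
    rw [if_neg hz] at h
    simp only [scanFirst, hg, if_neg hz]
    rw [ih (fun r hr => hc r (List.mem_cons_of_mem _ hr)) h]

lemma scan_cons (grid : List (List Int)) (c : Int) (p : Nat) (v : Int) (rest : List Int)
    (hc : ∀ row ∈ grid, PySem.List.pyGet? row c = some (row[p]?.getD 0))
    (hset : ∀ row ∈ grid, PySem.List.pySetD row c 0 = row.set p 0)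
    (h : colA p grid = v :: rest) :
    (scanFirst grid c).2 = some v ∧
    colA p (scanFirst grid c).1 = rest ∧
    (∀ q, q ≠ p → colA q (scanFirst grid c).1 = colA q grid) ∧
    (scanFirst grid c).1.map List.length = grid.map List.length := by
  induction grid with
  | nil => simp [colA] at h
  | cons row rst ih =>
    have hg := hc row (by simp)
    by_cases hz : row[p]?.getD 0 ≠ 0
    · simp only [colA, if_pos hz] at h
      have hv : row[p]?.getD 0 = v := (List.cons.injEq _ _ _ _ ▸ h).1
      have hr : colA p rst = rest := (List.cons.injEq _ _ _ _ ▸ h).2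
      have hpl : p < row.length := by
        by_contra hh
        apply hz
        rw [List.getElem?_eq_none (by omega)]
        rfl
      simp only [scanFirst, hg, if_pos hz, hset row (by simp)]
      refine ⟨by rw [hv], ?_, ?_, by simp⟩
      · have h0 : (row.set p 0)[p]?.getD 0 = 0 := by
          rw [List.getElem?_set_self (by simpa using hpl)]
          rfl
        simp only [colA, h0]
        simp [hr]
      · intro q hq
        have hne : (row.set p 0)[q]?.getD 0 = row[q]?.getD 0 := by
          rw [List.getElem?_set_ne (fun e => hq e.symm)]
        simp only [colA, hne]
    · simp only [colA, if_neg hz] at h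
      obtain ⟨h1, h2, h3, h4⟩ := ih (fun r hr => hc r (List.mem_cons_of_mem _ hr))
        (fun r hr => hset r (List.mem_cons_of_mem _ hr)) h
      simp only [scanFirst, hg, if_neg hz]
      refine ⟨h1, ?_, ?_, by simp [h4]⟩
      · simp only [colA, if_neg hz]
        exact h2
      · intro q hq
        simp only [colA]
        rw [h3 q hq]

lemma map_len_transfer (g g' : List (List Int))
    (h : g'.map List.length = g.map List.length) (P : Nat → Prop)
    (hg : ∀ row ∈ g, P row.length) : ∀ row ∈ g', P row.length := by
  intro row hr
  have hm : row.length ∈ g.map List.length := h ▸ List.mem_map_of_mem hr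
  obtain ⟨r0, hr0, he⟩ := List.mem_map.mp hm
  exact he ▸ hg r0 hr0

lemma step_sim (n : Nat) (grid : List (List Int)) (basket : List Int) (picked move : Int)
    (hlen : grid.length = n) (hrows : ∀ row ∈ grid, n ≤ row.length)
    (hm : 1 - (n : Int) ≤ move ∧ move ≤ (n : Int))
    (hq : move ≤ 0 → ∀ row ∈ grid, row.length = n) :
    stepA ((List.range n).map (fun p => colA p grid), basket, picked) move
      = ((List.range n).map (fun p => colA p (stepB (grid, basket, picked) move).1),
         (stepB (grid, basket, picked) move).2.1, (stepB (grid, basket, picked) move).2.2) ∧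
    (stepB (grid, basket, picked) move).1.map List.length = grid.map List.length := by
  obtain ⟨hm1, hm2⟩ := hm
  have hnz : 0 < n := by omega
  set p : Nat := if 0 ≤ move - 1 then (move - 1).toNat else (move - 1 + n).toNat with hp
  have hpn : p < n := by rw [hp]; split <;> omega
  have hd : (0 ≤ move - 1 ∧ p = (move - 1).toNat) ∨
      (move - 1 < 0 ∧ -(n : Int) ≤ move - 1 ∧ p = (move - 1 + n).toNat) := by
    by_cases h0 : 0 ≤ move - 1
    · exact Or.inl ⟨h0, by rw [hp, if_pos h0]⟩
    · exact Or.inr ⟨by omega, by omega, by rw [hp, if_neg h0]⟩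
  have hnbL : ((List.range n).map (fun p => colA p grid)).length = n := by simp
  have hnb : PySem.List.pyGet? ((List.range n).map (fun p => colA p grid)) (move - 1)
      = some (colA p grid) := by
    rw [pyGet?_normIdx _ (move - 1) p (by rw [hnbL]; exact hd), List.getElem?_map,
      List.getElem?_range hpn]
    rfl
  have hsetD : PySem.List.pySetD ((List.range n).map (fun p => colA p grid)) (move - 1)
      = fun rest => ((List.range n).map (fun p => colA p grid)).set p rest := by
    funext rest
    exact pySetD_normIdx _ (move - 1) rest p (by rw [hnbL]; exact hd)
  have hc : ∀ row ∈ grid, PySem.List.pyGet? row (move - 1) = some (row[p]?.getD 0) := by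
    intro row hr
    have hrl : move - 1 < 0 → row.length = n := fun h0 => hq (by omega) row hr
    have hplen : p < row.length := by
      rcases hd with ⟨h0, _⟩ | ⟨h0, _, _⟩
      · exact lt_of_lt_of_le hpn (hrows row hr)
      · rw [hrl h0]; exact hpn
    rw [pyGet?_normIdx row (move - 1) p ?_, List.getElem?_eq_getElem hplen]
    · rfl
    · rcases hd with ⟨h0, hp'⟩ | ⟨h0, h1, hp'⟩
      · exact Or.inl ⟨h0, hp'⟩
      · exact Or.inr ⟨h0, by rw [hrl h0]; exact h1, by rw [hrl h0]; exact hp'⟩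
  have hset : ∀ row ∈ grid, PySem.List.pySetD row (move - 1) 0 = row.set p 0 := by
    intro row hr
    have hrl : move - 1 < 0 → row.length = n := fun h0 => hq (by omega) row hr
    refine pySetD_normIdx row (move - 1) 0 p ?_
    rcases hd with ⟨h0, hp'⟩ | ⟨h0, h1, hp'⟩
    · exact Or.inl ⟨h0, hp'⟩
    · exact Or.inr ⟨h0, by rw [hrl h0]; exact h1, by rw [hrl h0]; exact hp'⟩
  cases hcol : colA p grid with
  | nil =>
    have hscan : scanFirst grid (move - 1) = (grid, none) := scan_nil grid _ p hc hcol
    have hB : stepB (grid, basket, picked) move = (grid, basket, picked) := by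
      simp only [stepB, hscan]
    rw [hB]
    refine ⟨?_, rfl⟩
    simp only [stepA, hnb, hcol]
    simp
  | cons v rest =>
    obtain ⟨h1, h2, h3, h4⟩ := scan_cons grid (move - 1) p v rest hc hset hcol
    have hmap : ((List.range n).map (fun p => colA p grid)).set p rest
        = (List.range n).map (fun q => colA q (scanFirst grid (move - 1)).1) := by
      apply List.ext_getElem (by simp)
      intro i hi1 hi2
      simp only [List.getElem_set, List.getElem_map, List.getElem_range]
      by_cases hip : p = i
      · rw [if_pos hip, ← hip]
        exact h2.symm
      · rw [if_neg hip]
        exact (h3 i (fun e => hip e.symm)).symm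
    by_cases hcnd : basket.length ≠ 0 ∧ PySem.List.pyGet? basket (-1) = some v
    · have hA : stepA ((List.range n).map (fun p => colA p grid), basket, picked) move
          = (((List.range n).map (fun p => colA p grid)).set p rest,
             basket.dropLast, picked + 1) := by
        simp only [stepA, hnb, hcol, PySem.List.pop?_zero_cons]
        rw [if_pos (by simp), if_pos hcnd, hsetD]
      have hB : stepB (grid, basket, picked) move
          = ((scanFirst grid (move - 1)).1, basket.dropLast, picked + 1) := by
        simp only [stepB, h1]
        rw [if_pos hcnd]
      rw [hA, hB, hmap]
      exact ⟨rfl, h4⟩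
    · have hA : stepA ((List.range n).map (fun p => colA p grid), basket, picked) move
          = (((List.range n).map (fun p => colA p grid)).set p rest,
             basket ++ [v], picked + 1) := by
        simp only [stepA, hnb, hcol, PySem.List.pop?_zero_cons]
        rw [if_pos (by simp), if_neg hcnd, hsetD]
      have hB : stepB (grid, basket, picked) move
          = ((scanFirst grid (move - 1)).1, basket ++ [v], picked + 1) := by
        simp only [stepB, h1]
        rw [if_neg hcnd]
      rw [hA, hB, hmap]
      exact ⟨rfl, h4⟩

lemma loop_sim (n : Nat) (moves : List Int) :
    ∀ (grid : List (List Int)) (basket : List Int) (picked : Int),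
    grid.length = n → (∀ row ∈ grid, n ≤ row.length) →
    (∀ m ∈ moves, 1 - (n : Int) ≤ m ∧ m ≤ (n : Int)) →
    ((∃ m ∈ moves, m ≤ 0) → ∀ row ∈ grid, row.length = n) →
    moves.foldl stepA ((List.range n).map (fun p => colA p grid), basket, picked)
      = ((List.range n).map (fun p => colA p (moves.foldl stepB (grid, basket, picked)).1),
         (moves.foldl stepB (grid, basket, picked)).2.1,
         (moves.foldl stepB (grid, basket, picked)).2.2) := by
  induction moves with
  | nil => intro grid basket picked _ _ _ _; simp
  | cons move rst ih =>
    intro grid basket picked hlen hrows hmv hq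
    obtain ⟨hstep, hL⟩ := step_sim n grid basket picked move hlen hrows
      (hmv move (by simp)) (fun h0 => hq ⟨move, by simp, h0⟩)
    simp only [List.foldl_cons, hstep]
    have hlen' : (stepB (grid, basket, picked) move).1.length = n := by
      have := congrArg List.length hL
      simpa [hlen] using this
    have hrows' : ∀ row ∈ (stepB (grid, basket, picked) move).1, n ≤ row.length :=
      map_len_transfer grid _ hL (fun k => n ≤ k) hrows
    have hq' : (∃ m ∈ rst, m ≤ 0) → ∀ row ∈ (stepB (grid, basket, picked) move).1,
        row.length = n := by
      rintro ⟨m, hm, h0⟩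
      exact map_len_transfer grid _ hL (fun k => k = n)
        (hq ⟨m, List.mem_cons_of_mem _ hm, h0⟩)
    have := ih (stepB (grid, basket, picked) move).1
      (stepB (grid, basket, picked) move).2.1
      (stepB (grid, basket, picked) move).2.2 hlen' hrows'
      (fun m hm => hmv m (List.mem_cons_of_mem _ hm)) hq'
    simpa using this

-- ===== VERDICT (by name: the statement is the Claim_ definition above) =====
theorem solution_spec : Claim_equal_solution := by
  intro board moves _ hpre
  obtain ⟨hsq, hmv, hwrap⟩ := hpre
  show solution board moves = solution_alt board moves
  simp only [solution, solution_alt]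
  rw [build_eq_colA board hsq, loop_sim board.length moves board [] 0 rfl hsq hmv hwrap]
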